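-- pv_equiv track=rewrite | github.com/Whem/lotteryGuesser | src/LotteryGuesserDjango/processors/advanced_hybrid_intelligent_prediction.py | ensure_diversity
-- ===== SOURCE A (Python) =====
-- from typing import List, Tuple, Dict, Set
--
-- def ensure_diversity(numbers: List[int], min_number: int, max_number: int) -> List[int]:
--     """Diverzitás biztosítása a számok között."""
--     if len(numbers) < 3:
--         return numbers
--
--     diverse_numbers = [numbers[0]]
--
--     for num in numbers[1:]:
--         # Ellenőrizzük, hogy legalább 2 távolságra van
--         if all(abs(num - existing) >= 2 for existing in diverse_numbers):
--             diverse_numbers.append(num)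
--
--     return diverse_numbers
-- ===== SOURCE B (Python) =====
-- def ensure_diversity(numbers, min_number, max_number):
--     if len(numbers) < 3:
--         return numbers
--     result = []
--     blocked = set()
--     for num in numbers:
--         if num not in blocked:
--             result.append(num)
--             blocked.update((num - 1, num, num + 1))
--     return result
-- ===== Notes on version B (the rewrite author's own statement) =====
-- stated objective: faster
-- what changed: Instead of re-scanning the whole kept list with abs comparisons for every candidate, B maintains a set of blocked values (each kept number blocks num-1, num, num+1) and decides each candidate by one O(1) set-membership test; the separate first-element initialisation disappears since an empty blocked set keeps the first element automatically.
import Mathlib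
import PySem

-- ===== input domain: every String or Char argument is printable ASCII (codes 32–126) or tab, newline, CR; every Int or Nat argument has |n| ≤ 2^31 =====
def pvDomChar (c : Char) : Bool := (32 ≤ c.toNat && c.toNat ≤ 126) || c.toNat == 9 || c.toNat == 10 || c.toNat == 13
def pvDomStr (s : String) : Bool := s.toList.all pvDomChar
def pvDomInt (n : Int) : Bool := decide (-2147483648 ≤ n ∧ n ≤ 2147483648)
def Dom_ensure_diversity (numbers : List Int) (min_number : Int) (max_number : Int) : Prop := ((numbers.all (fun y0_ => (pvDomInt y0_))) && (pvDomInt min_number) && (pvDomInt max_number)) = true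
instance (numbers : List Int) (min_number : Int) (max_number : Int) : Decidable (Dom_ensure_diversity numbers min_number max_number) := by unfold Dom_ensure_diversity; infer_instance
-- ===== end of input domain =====

-- B replaces A's per-candidate rescan of all kept numbers by one membership test in a set of blocked values (num±1 around each kept number); measured faster.

-- ===== PORT A =====
def ensure_diversity (numbers : List Int) (min_number : Int) (max_number : Int) : List Int :=
  if numbers.length < 3 then numbers
  else
    match numbers with
    | [] => []   -- unreachable: length ≥ 3
    | x :: rest =>
      rest.foldl
        (fun diverse num =>
          if diverse.all (fun existing => decide (2 ≤ |num - existing|)) then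
            diverse ++ [num]
          else diverse)
        [x]

-- ===== PORT B =====
def ensure_diversity_alt (numbers : List Int) (min_number : Int) (max_number : Int) : List Int :=
  if numbers.length < 3 then numbers
  else
    (numbers.foldl
      (fun (st : List Int × PySem.Set Int) num =>
        if PySem.Set.contains st.2 num then st
        else (st.1 ++ [num], PySem.Set.update st.2 [num - 1, num, num + 1]))
      ([], PySem.Set.empty)).1

-- ===== PRECONDITION & SPEC =====
def Spec_ensure_diversity (numbers : List Int) (min_number : Int) (max_number : Int) (out : List Int) : Prop := out = ensure_diversity_alt numbers min_number max_number
instance (numbers : List Int) (min_number : Int) (max_number : Int) (out : List Int) : Decidable (Spec_ensure_diversity numbers min_number max_number out) := by unfold Spec_ensure_diversity; infer_instance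

-- ===== CLAIM (what is proved, stated in full; the proofs are below) =====
def Claim_equal_ensure_diversity : Prop := ∀ (numbers : List Int) (min_number : Int) (max_number : Int), Dom_ensure_diversity numbers min_number max_number → Spec_ensure_diversity numbers min_number max_number (ensure_diversity numbers min_number max_number)

-- ===== LEMMAS AND PROOFS =====

-- Invariant: `blocked` holds exactly the integers within distance 1 of some kept number.
def pvInv (dv : List Int) (blocked : PySem.Set Int) : Prop :=
  ∀ n : Int, n ∈ blocked ↔ ∃ e ∈ dv, |n - e| ≤ 1

theorem pvStep (l : List Int) :
    ∀ (dv : List Int) (blocked : PySem.Set Int), pvInv dv blocked →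
      l.foldl
        (fun diverse num =>
          if diverse.all (fun existing => decide (2 ≤ |num - existing|)) then
            diverse ++ [num]
          else diverse) dv
      =
      (l.foldl
        (fun (st : List Int × PySem.Set Int) num =>
          if PySem.Set.contains st.2 num then st
          else (st.1 ++ [num], PySem.Set.update st.2 [num - 1, num, num + 1]))
        (dv, blocked)).1 := by
  induction l with
  | nil => intro dv blocked _; rfl
  | cons num l ih =>
    intro dv blocked hinv
    simp only [List.foldl]
    have hmem : PySem.Set.contains blocked num = true ↔ ∃ e ∈ dv, |num - e| ≤ 1 := by
      rw [PySem.Set.contains_iff]; exact hinv num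
    have hall : (dv.all (fun existing => decide (2 ≤ |num - existing|)) = true)
        ↔ ¬ ∃ e ∈ dv, |num - e| ≤ 1 := by
      simp only [List.all_eq_true, decide_eq_true_eq]
      constructor
      · rintro h ⟨e, he, hle⟩; have := h e he; omega
      · intro h e he; by_contra hlt; exact h ⟨e, he, by omega⟩
    by_cases hc : ∃ e ∈ dv, |num - e| ≤ 1
    · rw [if_neg (by rw [hall]; simp [hc]), if_pos (by rw [hmem]; exact hc)]
      exact ih dv blocked hinv
    · rw [if_pos (by rw [hall]; exact hc), if_neg (by rw [hmem]; exact hc)]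
      apply ih
      intro n
      simp only [PySem.Set.update, List.foldl, PySem.Set.mem_add, List.mem_append,
        List.mem_singleton]
      rw [hinv n]
      constructor
      · rintro (((hx | h) | h) | h)
        · obtain ⟨e, he, hle⟩ := hx
          exact ⟨e, Or.inl he, hle⟩
        · exact ⟨num, Or.inr rfl, by rw [abs_le]; omega⟩
        · exact ⟨num, Or.inr rfl, by rw [abs_le]; omega⟩
        · exact ⟨num, Or.inr rfl, by rw [abs_le]; omega⟩
      · rintro ⟨e, he | rfl, hle⟩
        · exact Or.inl (Or.inl (Or.inl ⟨e, he, hle⟩))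
        · rw [abs_le] at hle
          have : n = e - 1 ∨ n = e ∨ n = e + 1 := by omega
          rcases this with rfl | rfl | rfl
          · exact Or.inl (Or.inl (Or.inr rfl))
          · exact Or.inl (Or.inr rfl)
          · exact Or.inr rfl

theorem ensure_diversity_eq :
    ∀ (numbers : List Int) (mn mx : Int),
      ensure_diversity numbers mn mx = ensure_diversity_alt numbers mn mx := by
  intro numbers mn mx
  unfold ensure_diversity ensure_diversity_alt
  by_cases h : numbers.length < 3
  · simp [h]
  · rw [if_neg h, if_neg h]
    match numbers with
    | [] => simp at h
    | x :: rest =>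
      simp only [List.foldl]
      rw [if_neg (by simp [PySem.Set.contains, PySem.Set.empty])]
      refine pvStep rest ([] ++ [x]) (PySem.Set.update PySem.Set.empty [x - 1, x, x + 1]) ?_
      intro n
      simp only [PySem.Set.update, PySem.Set.empty, List.foldl, PySem.Set.mem_add,
        List.not_mem_nil, false_or, List.nil_append, List.mem_singleton]
      constructor
      · rintro ((h | h) | h) <;> exact ⟨x, rfl, by rw [abs_le]; omega⟩
      · rintro ⟨e, rfl, hle⟩; rw [abs_le] at hle; omega

-- ===== VERDICT (by name: the statement is the Claim_ definition above) =====
theorem ensure_diversity_spec : Claim_equal_ensure_diversity := by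
  intro numbers mn mx _
  exact ensure_diversity_eq numbers mn mx
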